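-- pv_equiv track=rewrite | github.com/idanpap/katas | 6-kyu/make_a_window.py | make_a_window
-- ===== SOURCE A (Python) =====
-- def make_a_window(num):
--     string = ""
--     for i in range(num*2 + 3):
--         string += "-"
--     string += "\n"
--     for i in range(num*2 + 1):
--         for j in range(num*2 + 3):
--             if j == 0 or j == num*2 + 2:
--                 string += "|"
--             elif i == num:
--                 if j == num + 1:
--                     string += "+"
--                 else:
--                     string += "-"
--             else:
--                 if j == num + 1:
--                     string += "|"
--                 else:
--                     string += "."
--         string += "\n"
--     for i in range(num*2 + 3):
--         string += "-"
--     return string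
-- ===== SOURCE B (Python) =====
-- def make_a_window(num):
--     border = "-" * (2 * num + 3)
--     normal = "|" + "." * num + "|" + "." * num + "|"
--     middle = "|" + "-" * num + "+" + "-" * num + "|"
--     body = [middle if i == num else normal for i in range(2 * num + 1)]
--     return "\n".join([border] + body + [border])
-- ===== Notes on version B (the rewrite author's own statement) =====
-- stated objective: idiomatic
-- what changed: Replaces the per-cell nested loop with per-column branching by three row templates built once via string repetition, a row list comprehension, and a single '\n'.join.
import Mathlib
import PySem

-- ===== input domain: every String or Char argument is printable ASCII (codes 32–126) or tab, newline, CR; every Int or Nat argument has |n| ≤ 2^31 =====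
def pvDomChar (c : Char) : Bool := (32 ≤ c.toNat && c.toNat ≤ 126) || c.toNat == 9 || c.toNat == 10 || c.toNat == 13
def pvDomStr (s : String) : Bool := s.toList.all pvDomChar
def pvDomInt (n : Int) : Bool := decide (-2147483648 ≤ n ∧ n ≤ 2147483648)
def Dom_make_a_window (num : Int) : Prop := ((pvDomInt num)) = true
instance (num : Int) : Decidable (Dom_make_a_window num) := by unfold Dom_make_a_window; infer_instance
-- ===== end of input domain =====

-- B replaces A's per-cell nested loops by three row templates and a single join (idiomatic decomposition).

-- ===== PORT A =====
-- Python strings are ported on the List Char side (String.ofList at the end); each '+=' is '++ [c]'.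
def make_a_window (num : Int) : String :=
  let s1 : List Char := (PySem.List.pyRange 0 (num * 2 + 3) 1).foldl (fun s _ => s ++ ['-']) []
  let s2 : List Char := s1 ++ ['\n']
  let s3 : List Char := (PySem.List.pyRange 0 (num * 2 + 1) 1).foldl (fun s i =>
      ((PySem.List.pyRange 0 (num * 2 + 3) 1).foldl (fun s j =>
        if j = 0 ∨ j = num * 2 + 2 then s ++ ['|']
        else if i = num then (if j = num + 1 then s ++ ['+'] else s ++ ['-'])
        else (if j = num + 1 then s ++ ['|'] else s ++ ['.'])) s) ++ ['\n']) s2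
  let s4 : List Char := (PySem.List.pyRange 0 (num * 2 + 3) 1).foldl (fun s _ => s ++ ['-']) s3
  String.ofList s4

-- ===== PORT B =====
-- '"x" * n' is PySem.List.pyRepeat ['x'] n; '"\n".join' is PySem.Chars.join ['\n'].
def make_a_window_alt (num : Int) : String :=
  let border := PySem.List.pyRepeat ['-'] (2 * num + 3)
  let normal := ['|'] ++ PySem.List.pyRepeat ['.'] num ++ ['|'] ++ PySem.List.pyRepeat ['.'] num ++ ['|']
  let middle := ['|'] ++ PySem.List.pyRepeat ['-'] num ++ ['+'] ++ PySem.List.pyRepeat ['-'] num ++ ['|']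
  let body := (PySem.List.pyRange 0 (2 * num + 1) 1).map (fun i => if i = num then middle else normal)
  String.ofList (PySem.Chars.join ['\n'] ([border] ++ body ++ [border]))

-- ===== PRECONDITION & SPEC =====
def Spec_make_a_window (num : Int) (out : String) : Prop := out = make_a_window_alt num
instance (num : Int) (out : String) : Decidable (Spec_make_a_window num out) := by unfold Spec_make_a_window; infer_instance

-- ===== CLAIM (what is proved, stated in full; the proofs are below) =====
def Claim_equal_make_a_window : Prop := ∀ (num : Int), Dom_make_a_window num → Spec_make_a_window num (make_a_window num)

-- ===== LEMMAS AND PROOFS =====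

-- a fold that appends the same char at every step produces a replicate
theorem pv_foldl_const_append (c : Char) (l : List Int) :
    ∀ s : List Char, l.foldl (fun s _ => s ++ [c]) s = s ++ List.replicate l.length c := by
  induction l with
  | nil => simp
  | cons x xs ih => intro s; simp [List.foldl_cons, ih, List.replicate_succ]

-- a fold whose step appends the same char on every element of the list
theorem pv_foldl_append_of_mem (c : Char) (f : List Char → Int → List Char) (l : List Int)
    (h : ∀ (s : List Char) (j : Int), j ∈ l → f s j = s ++ [c]) :
    ∀ s : List Char, l.foldl f s = s ++ List.replicate l.length c := by
  induction l with
  | nil => simp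
  | cons x xs ih =>
    intro s
    rw [List.foldl_cons, h s x (by simp), ih (fun s j hj => h s j (by simp [hj]))]
    simp [List.replicate_succ]

-- a row-building fold appends g i for each i
theorem pv_foldl_append_row (g : Int → List Char) (l : List Int) :
    ∀ s : List Char, l.foldl (fun s i => s ++ g i) s = s ++ (l.map g).flatten := by
  induction l with
  | nil => simp
  | cons x xs ih => intro s; simp [List.foldl_cons, ih]

-- join with a last element
theorem pv_join_append_last (sep last : List Char) (xs : List (List Char)) :
    PySem.Chars.join sep (xs ++ [last]) = (xs.map (· ++ sep)).flatten ++ last := by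
  induction xs with
  | nil => simp [PySem.Chars.join_singleton]
  | cons x ys ih =>
    cases ys with
    | nil => simp [PySem.Chars.join_cons_cons, PySem.Chars.join_singleton]
    | cons y zs =>
      simp only [List.cons_append] at ih ⊢
      rw [PySem.Chars.join_cons_cons, ih]
      simp

-- A's inner column loop over range(num*2+3) builds exactly B's row template
theorem pv_row_eq (num i : Int) (hnum : 0 ≤ num) (s : List Char) :
    (PySem.List.pyRange 0 (num * 2 + 3) 1).foldl (fun s j =>
        if j = 0 ∨ j = num * 2 + 2 then s ++ ['|']
        else if i = num then (if j = num + 1 then s ++ ['+'] else s ++ ['-'])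
        else (if j = num + 1 then s ++ ['|'] else s ++ ['.'])) s
      = s ++ (['|'] ++ List.replicate num.toNat (if i = num then '-' else '.') ++
              [if i = num then '+' else '|'] ++
              List.replicate num.toNat (if i = num then '-' else '.') ++ ['|']) := by
  have hsplit : PySem.List.pyRange 0 (num * 2 + 3) 1 =
      PySem.List.pyRange 0 1 1 ++ (PySem.List.pyRange 1 (num + 1) 1 ++
      (PySem.List.pyRange (num + 1) (num + 2) 1 ++
      (PySem.List.pyRange (num + 2) (num * 2 + 2) 1 ++
      PySem.List.pyRange (num * 2 + 2) (num * 2 + 3) 1))) := by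
    rw [PySem.List.pyRange_one_append 0 1 (num * 2 + 3) (by omega) (by omega),
        PySem.List.pyRange_one_append 1 (num + 1) (num * 2 + 3) (by omega) (by omega),
        PySem.List.pyRange_one_append (num + 1) (num + 2) (num * 2 + 3) (by omega) (by omega),
        PySem.List.pyRange_one_append (num + 2) (num * 2 + 2) (num * 2 + 3) (by omega) (by omega)]
  have h0 : PySem.List.pyRange 0 1 1 = [(0 : Int)] := PySem.List.pyRange_one_singleton 0
  have hm : PySem.List.pyRange (num + 1) (num + 2) 1 = [num + 1] := by
    have := PySem.List.pyRange_one_singleton (num + 1)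
    rwa [show num + 1 + 1 = num + 2 by ring] at this
  have hl : PySem.List.pyRange (num * 2 + 2) (num * 2 + 3) 1 = [num * 2 + 2] := by
    have := PySem.List.pyRange_one_singleton (num * 2 + 2)
    rwa [show num * 2 + 2 + 1 = num * 2 + 3 by ring] at this
  have len1 : (PySem.List.pyRange 1 (num + 1) 1).length = num.toNat := by
    rw [PySem.List.length_pyRange_one]; omega
  have len2 : (PySem.List.pyRange (num + 2) (num * 2 + 2) 1).length = num.toNat := by
    rw [PySem.List.length_pyRange_one]; omega
  have hchunk1 : ∀ s : List Char, (PySem.List.pyRange 1 (num + 1) 1).foldl (fun s j =>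
        if j = 0 ∨ j = num * 2 + 2 then s ++ ['|']
        else if i = num then (if j = num + 1 then s ++ ['+'] else s ++ ['-'])
        else (if j = num + 1 then s ++ ['|'] else s ++ ['.'])) s
      = s ++ List.replicate num.toNat (if i = num then '-' else '.') := by
    intro s
    rw [pv_foldl_append_of_mem (if i = num then '-' else '.') _ _ ?_ s, len1]
    intro s j hj
    rw [PySem.List.mem_pyRange_one] at hj
    rw [if_neg (show ¬ (j = 0 ∨ j = num * 2 + 2) by omega)]
    by_cases hi : i = num
    · rw [if_pos hi, if_neg (show ¬ j = num + 1 by omega), if_pos hi]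
    · rw [if_neg hi, if_neg (show ¬ j = num + 1 by omega), if_neg hi]
  have hchunk2 : ∀ s : List Char, (PySem.List.pyRange (num + 2) (num * 2 + 2) 1).foldl (fun s j =>
        if j = 0 ∨ j = num * 2 + 2 then s ++ ['|']
        else if i = num then (if j = num + 1 then s ++ ['+'] else s ++ ['-'])
        else (if j = num + 1 then s ++ ['|'] else s ++ ['.'])) s
      = s ++ List.replicate num.toNat (if i = num then '-' else '.') := by
    intro s
    rw [pv_foldl_append_of_mem (if i = num then '-' else '.') _ _ ?_ s, len2]
    intro s j hj
    rw [PySem.List.mem_pyRange_one] at hj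
    rw [if_neg (show ¬ (j = 0 ∨ j = num * 2 + 2) by omega)]
    by_cases hi : i = num
    · rw [if_pos hi, if_neg (show ¬ j = num + 1 by omega), if_pos hi]
    · rw [if_neg hi, if_neg (show ¬ j = num + 1 by omega), if_neg hi]
  have c2 : ¬ (num + 1 = 0 ∨ num + 1 = num * 2 + 2) := by omega
  rw [hsplit]
  simp only [List.foldl_append, h0, hm, hl, List.foldl_cons, List.foldl_nil, or_true, true_or,
    if_true]
  rw [if_neg c2]
  simp only [hchunk1, hchunk2]
  by_cases hi : i = num
  · simp [hi, List.append_assoc]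
  · simp [hi, List.append_assoc]

-- ===== VERDICT (by name: the statement is the Claim_ definition above) =====
theorem make_a_window_spec : Claim_equal_make_a_window := by
  intro num _
  unfold Spec_make_a_window make_a_window make_a_window_alt
  apply congrArg String.ofList
  simp only [PySem.List.pyRepeat_singleton]
  -- B side: turn the join into border ++ '\n' ++ flat rows ++ border
  rw [show ([List.replicate (2 * num + 3).toNat '-'] ++
        (PySem.List.pyRange 0 (2 * num + 1) 1).map (fun i =>
          if i = num then ['|'] ++ List.replicate num.toNat '-' ++ ['+'] ++
              List.replicate num.toNat '-' ++ ['|']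
          else ['|'] ++ List.replicate num.toNat '.' ++ ['|'] ++
              List.replicate num.toNat '.' ++ ['|']) ++
        [List.replicate (2 * num + 3).toNat '-'])
      = (List.replicate (2 * num + 3).toNat '-' ::
        (PySem.List.pyRange 0 (2 * num + 1) 1).map (fun i =>
          if i = num then ['|'] ++ List.replicate num.toNat '-' ++ ['+'] ++
              List.replicate num.toNat '-' ++ ['|']
          else ['|'] ++ List.replicate num.toNat '.' ++ ['|'] ++
              List.replicate num.toNat '.' ++ ['|'])) ++
        [List.replicate (2 * num + 3).toNat '-'] by simp]
  rw [pv_join_append_last]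
  -- A side: the two border loops
  have hlen : (PySem.List.pyRange 0 (num * 2 + 3) 1).length = (2 * num + 3).toNat := by
    rw [PySem.List.length_pyRange_one]; omega
  rw [pv_foldl_const_append, pv_foldl_const_append, hlen]
  -- A side: the rows loop, one row at a time
  have hrows : ∀ s : List Char, (PySem.List.pyRange 0 (num * 2 + 1) 1).foldl (fun s i =>
      ((PySem.List.pyRange 0 (num * 2 + 3) 1).foldl (fun s j =>
        if j = 0 ∨ j = num * 2 + 2 then s ++ ['|']
        else if i = num then (if j = num + 1 then s ++ ['+'] else s ++ ['-'])
        else (if j = num + 1 then s ++ ['|'] else s ++ ['.'])) s) ++ ['\n']) s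
      = s ++ (((PySem.List.pyRange 0 (num * 2 + 1) 1).map (fun i =>
          (if i = num then ['|'] ++ List.replicate num.toNat '-' ++ ['+'] ++
              List.replicate num.toNat '-' ++ ['|']
          else ['|'] ++ List.replicate num.toNat '.' ++ ['|'] ++
              List.replicate num.toNat '.' ++ ['|']) ++ ['\n'])).flatten) := by
    intro s
    rw [← pv_foldl_append_row (fun i =>
      (if i = num then ['|'] ++ List.replicate num.toNat '-' ++ ['+'] ++
          List.replicate num.toNat '-' ++ ['|']
       else ['|'] ++ List.replicate num.toNat '.' ++ ['|'] ++
          List.replicate num.toNat '.' ++ ['|']) ++ ['\n'])]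
    apply PySem.List.foldl_congr_mem
    intro acc i hi
    rw [PySem.List.mem_pyRange_one] at hi
    have hnum : 0 ≤ num := by omega
    rw [pv_row_eq num i hnum acc]
    by_cases hieq : i = num <;> simp [hieq, List.append_assoc]
  rw [hrows]
  have hmap : (PySem.List.pyRange 0 (num * 2 + 1) 1) = (PySem.List.pyRange 0 (2 * num + 1) 1) := by
    rw [show num * 2 + 1 = 2 * num + 1 by ring]
  rw [hmap]
  simp [List.map_map, List.append_assoc, Function.comp_def]
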